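-- pv_equiv track=rewrite | github.com/Mig1a/DSA-Solution | Unit 3/sess 1/Advanced/P3 -Arrange Event Attendees by Priority.py | arrange_attendees_by_priority
-- ===== SOURCE A (Python) =====
-- def arrange_attendees_by_priority(attendees, priority):
--     less = []
--     equal = []
--     greater = []
--
--     for attendee in attendees:
--         if attendee < priority:
--             less.append(attendee)
--         elif attendee == priority:
--             equal.append(attendee)
--         else:
--             greater.append(attendee)
--
--     return less + equal + greater
-- ===== SOURCE B (Python) =====
-- def arrange_attendees_by_priority(attendees, priority):
--     return sorted(attendees, key=lambda a: 0 if a < priority else (1 if a == priority else 2))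
-- ===== Notes on version B (the rewrite author's own statement) =====
-- stated objective: alternative
-- what changed: Replaces the explicit three-list partition loop with a single stable sort keyed by the band (0: below, 1: equal, 2: above priority); stability preserves within-band input order, so the output is identical.
import Mathlib
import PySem

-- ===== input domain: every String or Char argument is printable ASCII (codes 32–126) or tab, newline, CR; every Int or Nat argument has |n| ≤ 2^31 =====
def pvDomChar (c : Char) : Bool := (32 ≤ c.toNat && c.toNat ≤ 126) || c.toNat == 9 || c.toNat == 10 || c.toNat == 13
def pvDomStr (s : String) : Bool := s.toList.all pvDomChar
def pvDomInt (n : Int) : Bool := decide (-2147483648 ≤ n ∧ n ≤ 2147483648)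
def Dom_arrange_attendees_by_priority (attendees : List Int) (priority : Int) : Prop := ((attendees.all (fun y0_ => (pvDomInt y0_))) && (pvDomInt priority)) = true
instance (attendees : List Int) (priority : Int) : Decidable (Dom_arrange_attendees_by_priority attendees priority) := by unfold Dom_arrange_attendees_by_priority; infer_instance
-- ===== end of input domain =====

-- B replaces A's explicit three-list partition loop with one stable sort keyed by the band
-- (0 below / 1 equal / 2 above priority); an alternative decomposition, not claimed faster.

-- ===== PORT A =====
-- A: one pass appending each attendee to less / equal / greater, then less + equal + greater.
def arrange_attendees_by_priority (attendees : List Int) (priority : Int) : List Int :=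
  let r := attendees.foldl
    (fun (s : List Int × List Int × List Int) attendee =>
      if attendee < priority then (s.1 ++ [attendee], s.2.1, s.2.2)
      else if attendee = priority then (s.1, s.2.1 ++ [attendee], s.2.2)
      else (s.1, s.2.1, s.2.2 ++ [attendee]))
    ([], [], [])
  r.1 ++ r.2.1 ++ r.2.2

-- ===== PORT B =====
-- B: sorted(attendees, key=lambda a: 0 if a < priority else (1 if a == priority else 2))
def arrange_attendees_by_priority_alt (attendees : List Int) (priority : Int) : List Int :=
  PySem.List.sorted attendees
    (fun a => if a < priority then (0 : Int) else if a = priority then 1 else 2) false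

-- ===== PRECONDITION & SPEC =====
def Spec_arrange_attendees_by_priority (attendees : List Int) (priority : Int) (out : List Int) : Prop := out = arrange_attendees_by_priority_alt attendees priority
instance (attendees : List Int) (priority : Int) (out : List Int) : Decidable (Spec_arrange_attendees_by_priority attendees priority out) := by unfold Spec_arrange_attendees_by_priority; infer_instance

-- ===== CLAIM (what is proved, stated in full; the proofs are below) =====
def Claim_equal_arrange_attendees_by_priority : Prop := ∀ (attendees : List Int) (priority : Int), Dom_arrange_attendees_by_priority attendees priority → Spec_arrange_attendees_by_priority attendees priority (arrange_attendees_by_priority attendees priority)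

-- ===== LEMMAS AND PROOFS =====

-- the band key B sorts by
def pvBand (p a : Int) : Int := if a < p then 0 else if a = p then 1 else 2

-- A's loop, started from any triple, appends the three band-filtered sublists componentwise.
theorem pvFoldA (p : Int) (xs : List Int) (l0 l1 l2 : List Int) :
    xs.foldl
      (fun (s : List Int × List Int × List Int) attendee =>
        if attendee < p then (s.1 ++ [attendee], s.2.1, s.2.2)
        else if attendee = p then (s.1, s.2.1 ++ [attendee], s.2.2)
        else (s.1, s.2.1, s.2.2 ++ [attendee]))
      (l0, l1, l2)
    = (l0 ++ xs.filter (fun a => pvBand p a = 0),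
       l1 ++ xs.filter (fun a => pvBand p a = 1),
       l2 ++ xs.filter (fun a => pvBand p a = 2)) := by
  induction xs generalizing l0 l1 l2 with
  | nil => simp
  | cons x xs ih =>
    simp only [List.foldl_cons, List.filter_cons]
    by_cases h0 : x < p
    · have hb : pvBand p x = 0 := by simp [pvBand, h0]
      simp [h0, hb, ih, List.append_assoc]
    · by_cases h1 : x = p
      · subst h1
        have hb : pvBand x x = 1 := by simp [pvBand]
        simp [hb, ih, List.append_assoc]
      · have hb : pvBand p x = 2 := by simp [pvBand, h0, h1]
        simp [h0, h1, hb, ih, List.append_assoc]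

-- insertBy's one-step unfolding on a nonempty list
theorem pvInsertBy_cons (before : Int → Int → Bool) (x y : Int) (ys : List Int) :
    PySem.List.insertBy before x (y :: ys)
    = if before x y then x :: y :: ys else y :: PySem.List.insertBy before x ys := rfl

-- insertion skips a prefix the element does not go before
theorem pvInsertBy_skip (before : Int → Int → Bool) (x : Int) (as bs : List Int)
    (h : ∀ y ∈ as, before x y = false) :
    PySem.List.insertBy before x (as ++ bs) = as ++ PySem.List.insertBy before x bs := by
  induction as with
  | nil => simp
  | cons a as ih =>
    rw [List.cons_append, pvInsertBy_cons]
    simp [h a (by simp), ih (fun y hy => h y (by simp [hy]))]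

-- insertion goes right before the first element it is before
theorem pvInsertBy_head (before : Int → Int → Bool) (x h : Int) (t : List Int)
    (hh : before x h = true) :
    PySem.List.insertBy before x (h :: t) = x :: h :: t := by
  rw [pvInsertBy_cons]; simp [hh]

-- one stable insertion into a banded concatenation lands at the end of its own band
theorem pvInsert_banded (p x : Int) (l0 l1 l2 : List Int)
    (h0 : ∀ y ∈ l0, pvBand p y = 0) (h1 : ∀ y ∈ l1, pvBand p y = 1)
    (h2 : ∀ y ∈ l2, pvBand p y = 2) :
    PySem.List.insertBy (fun a b => decide (pvBand p a < pvBand p b)) x (l0 ++ (l1 ++ l2))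
    = if pvBand p x = 0 then (l0 ++ [x]) ++ (l1 ++ l2)
      else if pvBand p x = 1 then l0 ++ ((l1 ++ [x]) ++ l2)
      else l0 ++ (l1 ++ (l2 ++ [x])) := by
  by_cases e0 : pvBand p x = 0
  · rw [pvInsertBy_skip _ _ l0 (l1 ++ l2) (fun y hy => by simp [h0 y hy, e0])]
    cases hc : l1 ++ l2 with
    | nil =>
      obtain ⟨ha1, ha2⟩ := List.append_eq_nil_iff.mp hc
      subst ha1; subst ha2
      simp [PySem.List.insertBy, e0]
    | cons h t =>
      have hmem : h ∈ l1 ++ l2 := by rw [hc]; simp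
      have hband : pvBand p h = 1 ∨ pvBand p h = 2 := by
        rcases List.mem_append.mp hmem with hm | hm
        · exact Or.inl (h1 _ hm)
        · exact Or.inr (h2 _ hm)
      rw [pvInsertBy_head _ _ _ _ (by rcases hband with hb | hb <;> simp [hb, e0])]
      simp [e0, ← hc, List.append_assoc]
  · by_cases e1 : pvBand p x = 1
    · rw [pvInsertBy_skip _ _ l0 (l1 ++ l2) (fun y hy => by simp [h0 y hy, e1]),
         pvInsertBy_skip _ _ l1 l2 (fun y hy => by simp [h1 y hy, e1])]
      cases hc : l2 with
      | nil => subst hc; simp [PySem.List.insertBy, e1]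
      | cons h t =>
        rw [pvInsertBy_head _ _ _ _ (by simp [h2 h (by rw [hc]; simp), e1])]
        simp [e1, List.append_assoc]
    · have e2 : pvBand p x = 2 := by unfold pvBand at *; split_ifs at * <;> omega
      rw [PySem.List.insertBy_of_forall_not_before _ _ _ (fun y hy => by
        rcases List.mem_append.mp hy with hm | hm
        · simp [h0 y hm, e2]
        · rcases List.mem_append.mp hm with hm' | hm'
          · simp [h1 y hm', e2]
          · simp [h2 y hm', e2])]
      simp [e0, e1, List.append_assoc]

-- B's stable sort, as a left fold of insertions from any banded state, is the band partition.
theorem pvFoldB (p : Int) (xs : List Int) (l0 l1 l2 : List Int)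
    (h0 : ∀ y ∈ l0, pvBand p y = 0) (h1 : ∀ y ∈ l1, pvBand p y = 1)
    (h2 : ∀ y ∈ l2, pvBand p y = 2) :
    xs.foldl (fun acc x => PySem.List.insertBy (fun a b => decide (pvBand p a < pvBand p b)) x acc)
      (l0 ++ (l1 ++ l2))
    = (l0 ++ xs.filter (fun a => pvBand p a = 0)) ++
      ((l1 ++ xs.filter (fun a => pvBand p a = 1)) ++
       (l2 ++ xs.filter (fun a => pvBand p a = 2))) := by
  induction xs generalizing l0 l1 l2 with
  | nil => simp
  | cons x xs ih =>
    simp only [List.foldl_cons, List.filter_cons]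
    rw [pvInsert_banded p x l0 l1 l2 h0 h1 h2]
    by_cases e0 : pvBand p x = 0
    · rw [if_pos e0, ih (l0 ++ [x]) l1 l2
        (fun y hy => by rcases List.mem_append.mp hy with hm | hm
                        · exact h0 y hm
                        · simpa [List.mem_singleton.mp hm] using e0) h1 h2]
      simp [e0, List.append_assoc]
    · by_cases e1 : pvBand p x = 1
      · rw [if_neg e0, if_pos e1, ih l0 (l1 ++ [x]) l2 h0
          (fun y hy => by rcases List.mem_append.mp hy with hm | hm
                          · exact h1 y hm
                          · simpa [List.mem_singleton.mp hm] using e1) h2]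
        simp [e1, List.append_assoc]
      · have e2 : pvBand p x = 2 := by unfold pvBand at *; split_ifs at * <;> omega
        rw [if_neg e0, if_neg e1, ih l0 l1 (l2 ++ [x]) h0 h1
          (fun y hy => by rcases List.mem_append.mp hy with hm | hm
                          · exact h2 y hm
                          · simpa [List.mem_singleton.mp hm] using e2)]
        simp [e2, List.append_assoc]

-- ===== VERDICT (by name: the statement is the Claim_ definition above) =====
theorem arrange_attendees_by_priority_spec : Claim_equal_arrange_attendees_by_priority := by
  intro attendees priority _
  unfold Spec_arrange_attendees_by_priority arrange_attendees_by_priority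
    arrange_attendees_by_priority_alt
  have hkey : (fun a => if a < priority then (0 : Int) else if a = priority then 1 else 2)
      = pvBand priority := by
    funext a; simp [pvBand]
  rw [hkey, PySem.List.sorted_eq_foldl_insertBy]
  have := pvFoldB priority attendees [] [] [] (by simp) (by simp) (by simp)
  simp only [List.nil_append] at this
  rw [this, pvFoldA priority attendees [] [] []]
  simp [List.append_assoc]
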